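-- pv_equiv track=rewrite | github.com/harryhoang2301/kws-bnn-project | bitwise_infer.py | case_offsets
-- ===== SOURCE A (Python) =====
-- def case_offsets(case_name):
--     """Return valid (ky, kx) positions for a 3x3 kernel under SAME border handling."""
--     all_coords = [(ky, kx) for ky in range(3) for kx in range(3)]
--     if case_name == "interior":
--         return all_coords
--
--     valid = []
--     for ky, kx in all_coords:
--         dy = ky - 1
--         dx = kx - 1
--         ok_y = True
--         ok_x = True
--
--         if "top" in case_name and dy < 0:
--             ok_y = False
--         if "bottom" in case_name and dy > 0:
--             ok_y = False
--         if "left" in case_name and dx < 0: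
--             ok_x = False
--         if "right" in case_name and dx > 0:
--             ok_x = False
--
--         if ok_y and ok_x:
--             valid.append((ky, kx))
--     return valid
-- ===== SOURCE B (Python) =====
-- def case_offsets(case_name):
--     """Return valid (ky, kx) positions for a 3x3 kernel under SAME border handling."""
--     ys = [ky for ky in range(3)
--           if not ("top" in case_name and ky == 0)
--           and not ("bottom" in case_name and ky == 2)]
--     xs = [kx for kx in range(3)
--           if not ("left" in case_name and kx == 0)
--           and not ("right" in case_name and kx == 2)]
--     return [(ky, kx) for ky in ys for kx in xs]
-- ===== Notes on version B (the rewrite author's own statement) =====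
-- stated objective: simpler
-- what changed: B derives the allowed ky values and allowed kx values independently per axis and returns their Cartesian product, instead of scanning all 9 cells and re-testing the four substring conditions in each; the 'interior' special case disappears.
import Mathlib
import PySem

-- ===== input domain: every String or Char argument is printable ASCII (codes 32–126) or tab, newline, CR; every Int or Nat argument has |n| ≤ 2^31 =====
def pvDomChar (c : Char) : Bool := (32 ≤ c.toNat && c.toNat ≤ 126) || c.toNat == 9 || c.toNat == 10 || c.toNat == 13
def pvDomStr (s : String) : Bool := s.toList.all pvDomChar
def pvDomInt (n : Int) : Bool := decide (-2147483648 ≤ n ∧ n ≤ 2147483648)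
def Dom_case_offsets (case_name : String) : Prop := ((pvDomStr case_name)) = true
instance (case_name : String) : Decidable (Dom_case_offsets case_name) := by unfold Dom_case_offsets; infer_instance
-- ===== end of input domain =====

-- B computes the allowed offsets per axis and returns their product; A scans all 9 cells. Equivalent on all inputs.

-- ===== PORT A =====
def case_offsets (case_name : String) : List (Int × Int) :=
  let all_coords : List (Int × Int) :=
    (PySem.List.pyRange 0 3 1).flatMap (fun ky => (PySem.List.pyRange 0 3 1).map (fun kx => (ky, kx)))
  if case_name == "interior" then all_coords
  else
    all_coords.foldl (fun valid p =>
      let ky := p.1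
      let kx := p.2
      let dy := ky - 1
      let dx := kx - 1
      let ok_y := true
      let ok_y := if PySem.Str.isIn "top" case_name ∧ dy < 0 then false else ok_y
      let ok_y := if PySem.Str.isIn "bottom" case_name ∧ dy > 0 then false else ok_y
      let ok_x := true
      let ok_x := if PySem.Str.isIn "left" case_name ∧ dx < 0 then false else ok_x
      let ok_x := if PySem.Str.isIn "right" case_name ∧ dx > 0 then false else ok_x
      if ok_y && ok_x then valid ++ [(ky, kx)] else valid) []

-- ===== PORT B =====
def case_offsets_alt (case_name : String) : List (Int × Int) :=
  let ys := (PySem.List.pyRange 0 3 1).filter (fun ky =>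
    !(PySem.Str.isIn "top" case_name && ky == 0) && !(PySem.Str.isIn "bottom" case_name && ky == 2))
  let xs := (PySem.List.pyRange 0 3 1).filter (fun kx =>
    !(PySem.Str.isIn "left" case_name && kx == 0) && !(PySem.Str.isIn "right" case_name && kx == 2))
  ys.flatMap (fun ky => xs.map (fun kx => (ky, kx)))

-- ===== PRECONDITION & SPEC =====
def Spec_case_offsets (case_name : String) (out : List (Int × Int)) : Prop := out = case_offsets_alt case_name
instance (case_name : String) (out : List (Int × Int)) : Decidable (Spec_case_offsets case_name out) := by unfold Spec_case_offsets; infer_instance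

-- ===== CLAIM (what is proved, stated in full; the proofs are below) =====
def Claim_equal_case_offsets : Prop := ∀ (case_name : String), Dom_case_offsets case_name → Spec_case_offsets case_name (case_offsets case_name)

-- ===== LEMMAS AND PROOFS =====

-- ===== VERDICT (by name: the statement is the Claim_ definition above) =====
theorem case_offsets_spec : Claim_equal_case_offsets := by
  intro case_name _
  unfold Spec_case_offsets case_offsets case_offsets_alt
  by_cases hi : case_name = "interior"
  · subst hi; decide
  · have hi' : (case_name == "interior") = false := by simpa using hi
    rcases ht : PySem.Str.isIn "top" case_name <;>
      rcases hb : PySem.Str.isIn "bottom" case_name <;>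
      rcases hl : PySem.Str.isIn "left" case_name <;>
      rcases hr : PySem.Str.isIn "right" case_name <;>
      simp only [hi'] <;> decide
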